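-- pv_equiv track=rewrite | github.com/miliar/Code_Jam_Webscraper | solutions_python/Problem_184/1659.py | countains_digit
-- ===== SOURCE A (Python) =====
-- import copy
--
-- digit_dict = {0: "ZERO", 1: "ONE", 2: "TWO", 3: "THREE", 4: "FOUR", 5: "FIVE", 6: "SIX", 7: "SEVEN", 8: "EIGHT", 9: "NINE"}
--
-- def countains_digit(count_dict, i):
-- 	backup = copy.deepcopy(count_dict)
-- 	for char in digit_dict[i]:
-- 		if char not in backup or backup[char] == 0:
-- 			return False
-- 		else:
-- 			backup[char] = backup[char] - 1
-- 	return True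
-- ===== SOURCE B (Python) =====
-- digit_dict = {0: "ZERO", 1: "ONE", 2: "TWO", 3: "THREE", 4: "FOUR", 5: "FIVE", 6: "SIX", 7: "SEVEN", 8: "EIGHT", 9: "NINE"}
--
-- def countains_digit(count_dict, i):
--     word = digit_dict[i]
--     need = {}
--     for ch in word:
--         need[ch] = need.get(ch, 0) + 1
--     for ch, n in need.items():
--         if count_dict.get(ch, 0) < n:
--             return False
--     return True
-- ===== Notes on version B (the rewrite author's own statement) =====
-- stated objective: simpler
-- what changed: B builds the digit word's letter-frequency table once and compares each needed count against count_dict.get(ch,0), instead of deep-copying count_dict and simulating letter-by-letter decrements with an early zero test.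
-- intended difference: On inputs where some letter needed by the digit word has a negative count while every needed letter is present and otherwise sufficient, A returns True because its decrement loop only stops on an exact 0, whereas B returns False; a negative count cannot supply a letter, so False is the intended answer. — e.g. on countains_digit([("O", -1), ("N", 1), ("E", 1)], 1): A returns true, B returns false
import Mathlib
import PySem

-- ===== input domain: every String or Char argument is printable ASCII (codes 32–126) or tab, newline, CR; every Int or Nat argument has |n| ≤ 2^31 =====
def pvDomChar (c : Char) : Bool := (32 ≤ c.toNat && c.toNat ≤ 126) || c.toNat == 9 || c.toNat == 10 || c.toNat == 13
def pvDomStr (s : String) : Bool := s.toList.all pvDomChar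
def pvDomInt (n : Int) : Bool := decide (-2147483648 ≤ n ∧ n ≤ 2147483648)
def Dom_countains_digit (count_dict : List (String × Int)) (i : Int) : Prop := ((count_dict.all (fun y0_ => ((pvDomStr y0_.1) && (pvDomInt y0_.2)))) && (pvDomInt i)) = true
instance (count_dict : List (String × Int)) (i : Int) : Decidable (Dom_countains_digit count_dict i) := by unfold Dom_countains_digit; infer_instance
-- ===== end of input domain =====

-- B replaces A's deepcopy-and-decrement simulation by an aggregate-then-compare pass over the
-- word's letter-frequency table (objective: simpler); B intentionally rejects negative counts (see D_ below).

-- shared module constant: digit_dict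
def digitDict : PySem.Dict Int String :=
  PySem.Dict.ofList [(0, "ZERO"), (1, "ONE"), (2, "TWO"), (3, "THREE"), (4, "FOUR"),
                     (5, "FIVE"), (6, "SIX"), (7, "SEVEN"), (8, "EIGHT"), (9, "NINE")]

-- ===== PORT A =====
-- the 'for char in digit_dict[i]' loop with its early returns; backup = the (deep-copied) dict
def goA (cs : List Char) (backup : PySem.Dict String Int) : Bool :=
  match cs with
  | [] => true
  | c :: rest =>
    match backup.get? (String.singleton c) with
    | none => false                                   -- char not in backup
    | some v =>
      if v = 0 then false                             -- backup[char] == 0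
      else goA rest (backup.insert (String.singleton c) (v - 1))

def countains_digit (count_dict : List (String × Int)) (i : Int) : Bool :=
  match digitDict.get? i with
  | none => false                                     -- Python raises KeyError here; excluded by Pre_
  | some word => goA word.toList (PySem.Dict.mk count_dict)

-- ===== PORT B =====
def countains_digit_alt (count_dict : List (String × Int)) (i : Int) : Bool :=
  match digitDict.get? i with
  | none => false                                     -- digit_dict[i] raises here too; excluded by Pre_
  | some word =>
    -- need[ch] = need.get(ch, 0) + 1   (keys are the one-char strings of the word)
    let need := (word.toList.map String.singleton).foldl
      (fun d k => d.insert k (d.getD k 0 + 1)) PySem.Dict.empty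
    -- for ch, n in need.items(): if count_dict.get(ch, 0) < n: return False
    need.items.all (fun p => !decide ((PySem.Dict.mk count_dict).getD p.1 0 < p.2))

-- ===== PRECONDITION & SPEC =====
-- Pre_ excludes exactly the i outside digit_dict's keys, where A raises KeyError.
def Pre_countains_digit (count_dict : List (String × Int)) (i : Int) : Prop := 0 ≤ i ∧ i ≤ 9
instance (count_dict : List (String × Int)) (i : Int) : Decidable (Pre_countains_digit count_dict i) := by
  unfold Pre_countains_digit; infer_instance
def pvWitness_countains_digit : (List (String × Int)) × Int := ([("O", 1), ("N", 1), ("E", 1)], 1)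

-- the letters of digit_dict[i], as the one-character-string keys they are looked up by
def wordKeys (i : Int) : List String := ((digitDict.getD i "").toList).map String.singleton

-- On inputs where some letter needed by the digit word has a negative count while every needed
-- letter's count is negative or at least its multiplicity in the word, A returns True (its
-- decrement loop only stops on an exact 0) and B returns False; a negative count cannot supply
-- a letter, so False is intended.
def D_countains_digit (count_dict : List (String × Int)) (i : Int) : Prop :=
  (∃ k ∈ wordKeys i, (PySem.Dict.mk count_dict).getD k 0 < 0) ∧
  (∀ k ∈ wordKeys i, (PySem.Dict.mk count_dict).getD k 0 < 0 ∨
      (((wordKeys i).count k : Int) ≤ (PySem.Dict.mk count_dict).getD k 0))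
instance (count_dict : List (String × Int)) (i : Int) : Decidable (D_countains_digit count_dict i) := by
  unfold D_countains_digit; infer_instance

def Spec_countains_digit (count_dict : List (String × Int)) (i : Int) (out : Bool) : Prop :=
  ¬ D_countains_digit count_dict i → out = countains_digit_alt count_dict i
instance (count_dict : List (String × Int)) (i : Int) (out : Bool) : Decidable (Spec_countains_digit count_dict i out) := by
  unfold Spec_countains_digit; infer_instance

def pvDiffWitness_countains_digit : (List (String × Int)) × Int := ([("O", -1), ("N", 1), ("E", 1)], 1)
def pvDiffWitnessOut_countains_digit : Bool × Bool := (true, false)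

-- ===== CLAIM (what is proved, stated in full; the proofs are below) =====
def Claim_unchanged_countains_digit : Prop := ∀ (count_dict : List (String × Int)) (i : Int), Dom_countains_digit count_dict i → Pre_countains_digit count_dict i → Spec_countains_digit count_dict i (countains_digit count_dict i)
def Claim_changed_countains_digit : Prop := Dom_countains_digit (pvDiffWitness_countains_digit.1) (pvDiffWitness_countains_digit.2) ∧ Pre_countains_digit (pvDiffWitness_countains_digit.1) (pvDiffWitness_countains_digit.2) ∧ D_countains_digit (pvDiffWitness_countains_digit.1) (pvDiffWitness_countains_digit.2) ∧ countains_digit (pvDiffWitness_countains_digit.1) (pvDiffWitness_countains_digit.2) = pvDiffWitnessOut_countains_digit.1 ∧ countains_digit_alt (pvDiffWitness_countains_digit.1) (pvDiffWitness_countains_digit.2) = pvDiffWitnessOut_countains_digit.2 ∧ pvDiffWitnessOut_countains_digit.1 ≠ pvDiffWitnessOut_countains_digit.2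
def Claim_exact_countains_digit : Prop := ∀ (count_dict : List (String × Int)) (i : Int), Dom_countains_digit count_dict i → Pre_countains_digit count_dict i → D_countains_digit count_dict i → countains_digit count_dict i ≠ countains_digit_alt count_dict i

-- ===== LEMMAS AND PROOFS =====

theorem singleton_inj : Function.Injective String.singleton := by
  intro a b h; simpa [String.singleton] using h

-- D_ matches the per-letter condition (including key presence) used by the loop lemmas below
theorem keys_bridge (cd : List (String × Int)) (cs : List Char) :
    ((∃ k ∈ cs.map String.singleton, (PySem.Dict.mk cd).getD k 0 < 0) ∧
     (∀ k ∈ cs.map String.singleton, (PySem.Dict.mk cd).getD k 0 < 0 ∨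
        (((cs.map String.singleton).count k : Int) ≤ (PySem.Dict.mk cd).getD k 0))) ↔
    ((∃ c ∈ cs, (PySem.Dict.mk cd).getD (String.singleton c) 0 < 0) ∧
     (∀ c ∈ cs, (PySem.Dict.mk cd).contains (String.singleton c) = true ∧
        ((PySem.Dict.mk cd).getD (String.singleton c) 0 < 0 ∨ ((cs.count c : Int) ≤ (PySem.Dict.mk cd).getD (String.singleton c) 0)))) := by
  constructor
  · rintro ⟨⟨k, hk, hneg⟩, hall⟩
    rcases List.mem_map.mp hk with ⟨c, hc, rfl⟩
    refine ⟨⟨c, hc, hneg⟩, ?_⟩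
    intro c' hc'
    have h2 := hall _ (List.mem_map_of_mem hc')
    rw [List.count_map_of_injective cs String.singleton singleton_inj] at h2
    have hcnt : (0 : Int) < (cs.count c' : Int) := by
      have := List.count_pos_iff.mpr hc'; exact_mod_cast this
    refine ⟨?_, h2⟩
    by_cases hcon : (PySem.Dict.mk cd).contains (String.singleton c') = true
    · exact hcon
    · have h0 : (PySem.Dict.mk cd).getD (String.singleton c') 0 = 0 :=
        PySem.Dict.getD_of_not_contains (PySem.Dict.mk cd) 0 (Bool.not_eq_true _ ▸ Bool.of_not_eq_true hcon)
      omega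
  · rintro ⟨⟨c, hc, hneg⟩, hall⟩
    refine ⟨⟨String.singleton c, List.mem_map_of_mem hc, hneg⟩, ?_⟩
    intro k hk
    rcases List.mem_map.mp hk with ⟨c', hc', rfl⟩
    rw [List.count_map_of_injective cs String.singleton singleton_inj]
    exact (hall c' hc').2

-- characterisation of A's loop: it succeeds iff every letter is a key and its stored count is
-- negative (never hits 0) or at least the letter's multiplicity in the word
theorem goA_iff (cs : List Char) (d : PySem.Dict String Int) :
    goA cs d = true ↔ ∀ c ∈ cs,
      d.contains (String.singleton c) = true ∧
      (d.getD (String.singleton c) 0 < 0 ∨ ((cs.count c : Int) ≤ d.getD (String.singleton c) 0)) := by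
  induction cs generalizing d with
  | nil => simp [goA]
  | cons c rest ih =>
    cases hg : d.get? (String.singleton c) with
    | none =>
      simp only [goA, hg]
      constructor
      · intro h; exact absurd h (by simp)
      · intro h
        have := (h c (by simp)).1
        rw [PySem.Dict.contains_eq_isSome_get?, hg] at this
        simp at this
    | some v =>
      have hcont : d.contains (String.singleton c) = true := by
        rw [PySem.Dict.contains_eq_isSome_get?, hg]; rfl
      have hgd : d.getD (String.singleton c) 0 = v := PySem.Dict.getD_of_get?_eq_some d 0 hg
      by_cases hv : v = 0
      · simp only [goA, hg, hv]
        constructor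
        · intro h; exact absurd h (by simp)
        · intro h
          have := (h c (by simp)).2
          rw [hgd, hv] at this
          have hc : 0 < (c :: rest).count c := List.count_pos_iff.mpr (by simp)
          omega
      · simp only [goA, hg, if_neg hv]
        rw [ih]
        constructor
        · intro h x hx
          by_cases hxc : x = c
          · rw [hxc]
            refine ⟨hcont, ?_⟩
            by_cases hmem : c ∈ rest
            · have h2 := (h c hmem).2
              rw [PySem.Dict.getD_insert_self] at h2
              rw [hgd, List.count_cons_self]
              omega
            · rw [hgd, List.count_cons_self, List.count_eq_zero_of_not_mem hmem]
              omega
          · have hne : String.singleton x ≠ String.singleton c := fun he => hxc (singleton_inj he)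
            have hx' : x ∈ rest := (List.mem_cons.mp hx).resolve_left hxc
            have h2 := h x hx'
            rw [PySem.Dict.getD_insert_of_ne d _ _ hne, PySem.Dict.contains_insert] at h2
            have h2a := h2.1
            simp only [Bool.or_eq_true, beq_iff_eq] at h2a
            have hcc : (c :: rest).count x = rest.count x := by
              simp [Ne.symm hxc]
            refine ⟨h2a.resolve_left hne, ?_⟩
            rw [hcc]
            exact h2.2
        · intro h x hx
          by_cases hxc : x = c
          · rw [hxc]
            rw [PySem.Dict.getD_insert_self, PySem.Dict.contains_insert]
            refine ⟨by simp, ?_⟩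
            have h2 := (h c (by simp)).2
            rw [hgd, List.count_cons_self] at h2
            omega
          · have hne : String.singleton x ≠ String.singleton c := fun he => hxc (singleton_inj he)
            have hcc : (c :: rest).count x = rest.count x := by
              simp [Ne.symm hxc]
            have h2 := h x (List.mem_cons_of_mem _ hx)
            rw [hcc] at h2
            rw [PySem.Dict.getD_insert_of_ne d _ _ hne, PySem.Dict.contains_insert]
            exact ⟨by simp [h2.1], h2.2⟩

-- characterisation of B's pass: true iff every letter's multiplicity is covered by count_dict
theorem altB_iff (cs : List Char) (count_dict : List (String × Int)) :
    (((cs.map String.singleton).foldl (fun d k => d.insert k (d.getD k 0 + 1)) PySem.Dict.empty).items.all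
      (fun p => !decide ((PySem.Dict.mk count_dict).getD p.1 0 < p.2))) = true ↔
    ∀ c ∈ cs, ((cs.count c : Int) ≤ (PySem.Dict.mk count_dict).getD (String.singleton c) 0) := by
  rw [PySem.Dict.foldl_insert_getD_add_one_eq_counter, PySem.Dict.items_counter]
  simp only [List.all_map, List.all_eq_true, Function.comp]
  constructor
  · intro h c hc
    have hmem : String.singleton c ∈ PySem.Set.ofList (cs.map String.singleton) := by
      rw [PySem.Set.mem_ofList]; exact List.mem_map_of_mem hc
    have h1 := h _ hmem
    simp only [List.count_map_of_injective cs String.singleton singleton_inj,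
      Bool.not_eq_true', decide_eq_false_iff_not, not_lt] at h1
    exact h1
  · intro h k hk
    rw [PySem.Set.mem_ofList] at hk
    rcases List.mem_map.mp hk with ⟨c, hc, rfl⟩
    simp only [List.count_map_of_injective cs String.singleton singleton_inj,
      Bool.not_eq_true', decide_eq_false_iff_not, not_lt]
    exact h c hc

-- under Pre_, digit_dict[i] is found
theorem word_found (i : Int) (h0 : 0 ≤ i) (h9 : i ≤ 9) :
    digitDict.get? i = some (digitDict.getD i "") := by
  interval_cases i <;> decide

-- D_ holds exactly when the two results differ (given the same word)
theorem core (count_dict : List (String × Int)) (cs : List Char) :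
    (¬ ((∃ c ∈ cs, (PySem.Dict.mk count_dict).getD (String.singleton c) 0 < 0) ∧
        (∀ c ∈ cs, (PySem.Dict.mk count_dict).contains (String.singleton c) = true ∧
          ((PySem.Dict.mk count_dict).getD (String.singleton c) 0 < 0 ∨
            ((cs.count c : Int) ≤ (PySem.Dict.mk count_dict).getD (String.singleton c) 0)))) →
      goA cs (PySem.Dict.mk count_dict) =
        (((cs.map String.singleton).foldl (fun d k => d.insert k (d.getD k 0 + 1)) PySem.Dict.empty).items.all
          (fun p => !decide ((PySem.Dict.mk count_dict).getD p.1 0 < p.2)))) ∧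
    (((∃ c ∈ cs, (PySem.Dict.mk count_dict).getD (String.singleton c) 0 < 0) ∧
        (∀ c ∈ cs, (PySem.Dict.mk count_dict).contains (String.singleton c) = true ∧
          ((PySem.Dict.mk count_dict).getD (String.singleton c) 0 < 0 ∨
            ((cs.count c : Int) ≤ (PySem.Dict.mk count_dict).getD (String.singleton c) 0)))) →
      goA cs (PySem.Dict.mk count_dict) = true ∧
        (((cs.map String.singleton).foldl (fun d k => d.insert k (d.getD k 0 + 1)) PySem.Dict.empty).items.all
          (fun p => !decide ((PySem.Dict.mk count_dict).getD p.1 0 < p.2))) = false) := by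
  constructor
  · intro hnD
    by_cases hA : goA cs (PySem.Dict.mk count_dict) = true
    · have hpass := (goA_iff cs (PySem.Dict.mk count_dict)).mp hA
      have hnoneg : ∀ c ∈ cs, ¬ (PySem.Dict.mk count_dict).getD (String.singleton c) 0 < 0 := by
        intro c hc hneg
        exact hnD ⟨⟨c, hc, hneg⟩, hpass⟩
      have hB : ∀ c ∈ cs, ((cs.count c : Int) ≤ (PySem.Dict.mk count_dict).getD (String.singleton c) 0) := by
        intro c hc
        rcases (hpass c hc).2 with h | h
        · exact absurd h (hnoneg c hc)
        · exact h
      rw [hA, ((altB_iff cs count_dict).mpr hB)]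
    · have hA' : goA cs (PySem.Dict.mk count_dict) = false := by
        cases h : goA cs (PySem.Dict.mk count_dict) <;> simp_all
      rw [hA']
      have : ¬ ∀ c ∈ cs, ((cs.count c : Int) ≤ (PySem.Dict.mk count_dict).getD (String.singleton c) 0) := by
        intro hall
        apply hA
        rw [goA_iff]
        intro c hc
        have hcnt : (0 : Int) < (cs.count c : Int) := by
          have := List.count_pos_iff.mpr hc; exact_mod_cast this
        have hle := hall c hc
        refine ⟨?_, Or.inr hle⟩
        by_cases hcon : (PySem.Dict.mk count_dict).contains (String.singleton c) = true
        · exact hcon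
        · have : (PySem.Dict.mk count_dict).getD (String.singleton c) 0 = 0 :=
            PySem.Dict.getD_of_not_contains (PySem.Dict.mk count_dict) 0 (Bool.not_eq_true _ ▸ Bool.of_not_eq_true hcon)
          omega
      cases h : (((cs.map String.singleton).foldl (fun d k => d.insert k (d.getD k 0 + 1)) PySem.Dict.empty).items.all
          (fun p => !decide ((PySem.Dict.mk count_dict).getD p.1 0 < p.2))) with
      | false => rfl
      | true => exact absurd ((altB_iff cs count_dict).mp h) this
  · rintro ⟨⟨c, hc, hneg⟩, hpass⟩
    refine ⟨(goA_iff cs (PySem.Dict.mk count_dict)).mpr hpass, ?_⟩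
    cases h : (((cs.map String.singleton).foldl (fun d k => d.insert k (d.getD k 0 + 1)) PySem.Dict.empty).items.all
        (fun p => !decide ((PySem.Dict.mk count_dict).getD p.1 0 < p.2))) with
    | false => rfl
    | true =>
      have := (altB_iff cs count_dict).mp h c hc
      have hcnt : (0 : Int) < (cs.count c : Int) := by
        have := List.count_pos_iff.mpr hc; exact_mod_cast this
      omega

-- ===== VERDICT (by name: the statement is the Claim_ definition above) =====
theorem countains_digit_spec : Claim_unchanged_countains_digit := by
  intro count_dict i _ hpre hnD
  unfold countains_digit countains_digit_alt
  rw [word_found i hpre.1 hpre.2]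
  refine (core count_dict ((digitDict.getD i "").toList)).1 (fun hchar => hnD ?_)
  unfold D_countains_digit wordKeys
  exact (keys_bridge count_dict ((digitDict.getD i "").toList)).mpr hchar

set_option maxRecDepth 2048 in
theorem countains_digit_changed : Claim_changed_countains_digit := by
  unfold Claim_changed_countains_digit
  exact ⟨by rfl, by decide, by decide, by decide, by decide, by decide⟩

theorem countains_digit_tight : Claim_exact_countains_digit := by
  intro count_dict i _ hpre hD
  unfold countains_digit countains_digit_alt
  rw [word_found i hpre.1 hpre.2]
  unfold D_countains_digit wordKeys at hD
  have := (core count_dict ((digitDict.getD i "").toList)).2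
    ((keys_bridge count_dict ((digitDict.getD i "").toList)).mp hD)
  simp [this.1, this.2]
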